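-- pv_equiv track=rewrite | github.com/Githubtiger123/Leetcode_Python | L1048.py | longestStrChain1
-- ===== SOURCE A (Python) =====
-- from functools import cache
-- from typing import List
--
-- def longestStrChain1(words: List[str]) -> int:
--     ws = set(words)
--
--     @cache
--     def dfs(s):
--         ans = 0
--         for i in range(len(s)):
--             t = s[:i] + s[i + 1:]
--             if t in ws:
--                 ans = max(ans, dfs(t))
--
--         return ans + 1
--
--     return max(dfs(s) for s in words)
-- ===== SOURCE B (Python) =====
-- from typing import List
--
-- def longestStrChain1(words: List[str]) -> int:
--     dp = {}
--     for w in sorted(words, key=len):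
--         best = 0
--         for i in range(len(w)):
--             t = w[:i] + w[i + 1:]
--             best = max(best, dp.get(t, 0))
--         dp[w] = best + 1
--     return max(dp.values())
-- ===== Notes on version B (the rewrite author's own statement) =====
-- stated objective: alternative
-- what changed: Replaced A's memoized top-down recursion (@cache dfs over the word set) with a bottom-up dynamic program: sort words by length ascending and fill a dict word->longest chain ending there, then take max of the dict's values.
-- outside the precondition, e.g. on longestStrChain1([]): A raises ValueError, B raises ValueError
import Mathlib
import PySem

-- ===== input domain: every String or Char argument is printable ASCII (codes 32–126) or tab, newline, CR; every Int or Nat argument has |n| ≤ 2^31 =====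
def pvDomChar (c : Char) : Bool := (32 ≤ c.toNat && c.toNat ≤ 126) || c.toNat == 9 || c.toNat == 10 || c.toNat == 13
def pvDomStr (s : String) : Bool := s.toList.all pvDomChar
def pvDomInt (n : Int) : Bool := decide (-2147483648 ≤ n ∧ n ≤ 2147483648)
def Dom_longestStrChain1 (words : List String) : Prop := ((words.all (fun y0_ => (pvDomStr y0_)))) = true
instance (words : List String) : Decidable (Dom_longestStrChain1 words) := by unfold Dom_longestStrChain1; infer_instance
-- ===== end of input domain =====

-- B replaces A's memoized top-down DFS over the word set with a bottom-up DP over the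
-- words sorted by length (dict word -> best chain ending there); same O(Σ|w|²) cost
-- (objective: alternative). Return-value equivalence on nonempty input; both raise on [].

-- ===== PORT A =====
-- s[:i] + s[i+1:]  (shared textual helper: both Pythons form the deletion the same way)
def pvDelAt (s : List Char) (i : Nat) : List Char :=
  PySem.List.slice s none (some (i : Int)) ++ PySem.List.slice s (some ((i + 1 : Nat) : Int)) none

-- A's @cache dfs, memoization dropped (pure function, same values); fuel = |s| at every call
def pvDfsA (ws : PySem.Set (List Char)) : Nat → List Char → Int
  | 0, _ => 0 + 1
  | fuel + 1, s =>
    ((List.range s.length).foldl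
      (fun ans i =>
        if pvDelAt s i ∈ ws then max ans (pvDfsA ws fuel (pvDelAt s i)) else ans) 0) + 1

def longestStrChain1 (words : List String) : Int :=
  let ws : PySem.Set (List Char) := PySem.Set.ofList (words.map String.toList)
  (PySem.List.max? (words.map (fun s => pvDfsA ws s.toList.length s.toList)) (fun x => x)).getD 0

-- ===== PORT B =====
-- best+1 for word w given the dp built so far
def pvDpVal (dp : PySem.Dict (List Char) Int) (w : List Char) : Int :=
  ((List.range w.length).foldl (fun best i => max best (dp.getD (pvDelAt w i) 0)) 0) + 1

def pvDpStep (dp : PySem.Dict (List Char) Int) (w : List Char) : PySem.Dict (List Char) Int :=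
  dp.insert w (pvDpVal dp w)

def longestStrChain1_alt (words : List String) : Int :=
  let sl := PySem.List.sorted (words.map String.toList) (fun w => (w.length : Int)) false
  let dp := sl.foldl pvDpStep PySem.Dict.empty
  (PySem.List.max? dp.values (fun x => x)).getD 0

-- ===== PRECONDITION & SPEC =====
-- Python A raises ValueError (max() of an empty sequence) on words = []; excluded.
def Pre_longestStrChain1 (words : List String) : Prop := words ≠ []
instance (words : List String) : Decidable (Pre_longestStrChain1 words) := by
  unfold Pre_longestStrChain1; infer_instance
def pvWitness_longestStrChain1 : List String := ["a", "ab", "b"]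

def Spec_longestStrChain1 (words : List String) (out : Int) : Prop := out = longestStrChain1_alt words
instance (words : List String) (out : Int) : Decidable (Spec_longestStrChain1 words out) := by
  unfold Spec_longestStrChain1; infer_instance

-- ===== CLAIM (what is proved, stated in full; the proofs are below) =====
def Claim_equal_longestStrChain1 : Prop := ∀ (words : List String), Dom_longestStrChain1 words → Pre_longestStrChain1 words → Spec_longestStrChain1 words (longestStrChain1 words)

-- ===== LEMMAS AND PROOFS =====

-- abbreviations used only by the proofs
def pvAllL (words : List String) : List (List Char) := words.map String.toList
def pvWs (words : List String) : PySem.Set (List Char) := PySem.Set.ofList (pvAllL words)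
def pvSl (words : List String) : List (List Char) :=
  PySem.List.sorted (pvAllL words) (fun w => (w.length : Int)) false
-- the canonical chain value of a word (A's dfs with exact fuel)
def pvF (words : List String) (s : List Char) : Int := pvDfsA (pvWs words) s.length s

theorem pvDelAt_eq (s : List Char) (i : Nat) :
    pvDelAt s i = s.take i ++ s.drop (i + 1) := by
  unfold pvDelAt
  rw [PySem.List.slice_to_natCast, PySem.List.slice_from_natCast]

theorem pvDelAt_length (s : List Char) (i : Nat) (h : i < s.length) :
    (pvDelAt s i).length = s.length - 1 := by
  rw [pvDelAt_eq]
  simp only [List.length_append, List.length_take, List.length_drop]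
  omega

-- unfolding of the canonical value: recursion on deletions, fuel invisible
theorem pvF_unfold (words : List String) (s : List Char) :
    pvF words s =
      ((List.range s.length).foldl
        (fun ans i =>
          if pvDelAt s i ∈ pvWs words then max ans (pvF words (pvDelAt s i)) else ans) 0) + 1 := by
  unfold pvF
  cases h : s.length with
  | zero => simp [pvDfsA]
  | succ n =>
    rw [show pvDfsA (pvWs words) (n + 1) s = ((List.range s.length).foldl
        (fun ans i =>
          if pvDelAt s i ∈ pvWs words then max ans (pvDfsA (pvWs words) n (pvDelAt s i)) else ans) 0) + 1 from rfl, h]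
    have := PySem.List.foldl_congr_mem (List.range (n + 1))
      (fun ans i =>
        if pvDelAt s i ∈ pvWs words then max ans (pvDfsA (pvWs words) n (pvDelAt s i)) else ans)
      (fun ans i =>
        if pvDelAt s i ∈ pvWs words then max ans (pvDfsA (pvWs words) (pvDelAt s i).length (pvDelAt s i)) else ans)
      0 ?_
    · rw [this]
    · intro acc i hi
      have hlt : i < s.length := by rw [h]; exact List.mem_range.mp hi
      have hlen : (pvDelAt s i).length = n := by rw [pvDelAt_length s i hlt]; omega
      simp only [hlen]

-- members of the sorted list are words, and vice versa
theorem pvSl_mem (words : List String) (t : List Char) :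
    t ∈ pvSl words ↔ t ∈ pvAllL words :=
  PySem.List.mem_sorted _ _ _ _

theorem pvWs_mem (words : List String) (t : List Char) :
    t ∈ pvWs words ↔ t ∈ pvAllL words :=
  PySem.Set.mem_ofList _ _

-- any strictly shorter member of ws sits in the processed prefix p'
theorem pv_shorter_mem_prefix (words : List String) (p' : List (List Char)) (w : List Char)
    (rest : List (List Char)) (hsl : pvSl words = p' ++ w :: rest)
    (t : List Char) (ht : t ∈ pvWs words) (hlen : t.length < w.length) : t ∈ p' := by
  have hpw : (pvSl words).Pairwise (fun a b => (a.length : Int) ≤ (b.length : Int)) :=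
    PySem.List.sorted_pairwise (pvAllL words) (fun w => (w.length : Int))
  have htsl : t ∈ pvSl words := (pvSl_mem words t).mpr ((pvWs_mem words t).mp ht)
  rw [hsl] at htsl hpw
  rcases List.mem_append.mp htsl with h | h
  · exact h
  · exfalso
    rcases List.pairwise_append.mp hpw with ⟨_, hcons, _⟩
    rcases List.mem_cons.mp h with rfl | hrest
    · omega
    · have := (List.pairwise_cons.mp hcons).1 t hrest
      omega

-- the dp invariant: after processing prefix p of the sorted list, dp maps exactly
-- the members of p to their canonical chain values
theorem pv_dp_spec (words : List String) (p : List (List Char)) :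
    ∀ rest : List (List Char), pvSl words = p ++ rest →
      ∀ t, (List.foldl pvDpStep PySem.Dict.empty p).get? t =
        if t ∈ p then some (pvF words t) else none := by
  induction p using List.reverseRecOn with
  | nil =>
    intro rest hsl t
    simp [PySem.Dict.get?_empty]
  | append_singleton p' w ih =>
    intro rest hsl t
    have hsl' : pvSl words = p' ++ w :: rest := by rw [hsl]; simp
    have hget := ih (w :: rest) hsl'
    -- lookups during w's inner loop
    have hlook : ∀ i : Nat, i < w.length →
        (List.foldl pvDpStep PySem.Dict.empty p').getD (pvDelAt w i) 0 =
          if pvDelAt w i ∈ pvWs words then pvF words (pvDelAt w i) else 0 := by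
      intro i hi
      have hgd : (List.foldl pvDpStep PySem.Dict.empty p').getD (pvDelAt w i) 0 =
          ((List.foldl pvDpStep PySem.Dict.empty p').get? (pvDelAt w i)).getD 0 := rfl
      rw [hgd, hget (pvDelAt w i)]
      by_cases hw : pvDelAt w i ∈ pvWs words
      · have hp' : pvDelAt w i ∈ p' :=
          pv_shorter_mem_prefix words p' w rest hsl' (pvDelAt w i) hw
            (by rw [pvDelAt_length w i hi]; omega)
        simp [hp', hw]
      · have hp' : pvDelAt w i ∉ p' := by
          intro hmem
          exact hw ((pvWs_mem words _).mpr ((pvSl_mem words _).mp (by rw [hsl']; exact List.mem_append_left _ hmem)))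
        simp [hp', hw]
    -- the inner fold computes F w - 1
    have hinner : ∀ (l : List Nat), (∀ i ∈ l, i < w.length) → ∀ acc : Int, 0 ≤ acc →
        l.foldl (fun best i => max best ((List.foldl pvDpStep PySem.Dict.empty p').getD (pvDelAt w i) 0)) acc =
        l.foldl (fun ans i =>
          if pvDelAt w i ∈ pvWs words then max ans (pvF words (pvDelAt w i)) else ans) acc := by
      intro l
      induction l with
      | nil => intro _ acc _; rfl
      | cons i l ihl =>
        intro hmem acc hacc
        have hi : i < w.length := hmem i (List.mem_cons_self ..)
        simp only [List.foldl_cons]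
        rw [hlook i hi]
        by_cases hw : pvDelAt w i ∈ pvWs words
        · simp only [hw, if_true]
          exact ihl (fun j hj => hmem j (List.mem_cons_of_mem _ hj)) _ (le_max_of_le_left hacc)
        · simp only [hw, if_false]
          rw [max_eq_left hacc]
          exact ihl (fun j hj => hmem j (List.mem_cons_of_mem _ hj)) _ hacc
    have hval : pvDpVal (List.foldl pvDpStep PySem.Dict.empty p') w = pvF words w := by
      unfold pvDpVal
      rw [hinner (List.range w.length) (fun i hi => List.mem_range.mp hi) 0 le_rfl,
        ← pvF_unfold]
    -- step the outer fold
    have hfold : List.foldl pvDpStep PySem.Dict.empty (p' ++ [w]) =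
        (List.foldl pvDpStep PySem.Dict.empty p').insert w
          (pvDpVal (List.foldl pvDpStep PySem.Dict.empty p') w) := by
      rw [List.foldl_append]; rfl
    rw [hfold, hval]
    by_cases htw : t = w
    · subst htw
      rw [PySem.Dict.get?_insert_self]
      simp
    · rw [PySem.Dict.get?_insert_of_ne _ _ htw, hget t]
      have : (t ∈ p' ++ [w]) ↔ t ∈ p' := by simp [htw]
      by_cases hp : t ∈ p' <;> simp [hp, this]

-- max? by identity depends only on the set of elements
theorem pv_max?_congr_mem (xs ys : List Int) (h : ∀ x, x ∈ xs ↔ x ∈ ys) :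
    PySem.List.max? xs (fun x => x) = PySem.List.max? ys (fun x => x) := by
  cases hx : PySem.List.max? xs (fun x => x) with
  | none =>
    cases hy : PySem.List.max? ys (fun x => x) with
    | none => rfl
    | some m =>
      have := (h m).mpr (PySem.List.max?_mem hy)
      rw [(PySem.List.max?_eq_none_iff xs _).mp hx] at this
      simp at this
  | some m =>
    cases hy : PySem.List.max? ys (fun x => x) with
    | none =>
      have := (h m).mp (PySem.List.max?_mem hx)
      rw [(PySem.List.max?_eq_none_iff ys _).mp hy] at this
      simp at this
    | some m' =>
      have h1 : m ≤ m' := PySem.List.max?_isMax hy m ((h m).mp (PySem.List.max?_mem hx))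
      have h2 : m' ≤ m := PySem.List.max?_isMax hx m' ((h m').mpr (PySem.List.max?_mem hy))
      rw [le_antisymm h1 h2]

-- ===== VERDICT (by name: the statement is the Claim_ definition above) =====
theorem longestStrChain1_spec : Claim_equal_longestStrChain1 := by
  intro words _ _
  unfold Spec_longestStrChain1 longestStrChain1 longestStrChain1_alt
  -- dp after the whole sorted list
  have hspec := pv_dp_spec words (pvSl words) [] (by simp) 
  have hkeys : (List.foldl pvDpStep PySem.Dict.empty (pvSl words)).keys =
      PySem.Set.ofList (pvSl words) := by
    have : List.foldl pvDpStep PySem.Dict.empty (pvSl words) =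
        List.foldl (fun d x => d.insert x (pvDpVal d x)) PySem.Dict.empty (pvSl words) := rfl
    rw [this, PySem.Dict.keys_foldl_insert]
    exact PySem.Set.update_nil_left _
  have hvals : (List.foldl pvDpStep PySem.Dict.empty (pvSl words)).values =
      (PySem.Set.ofList (pvSl words)).map (pvF words) := by
    rw [PySem.Dict.values_eq_map_keys _ (by rw [hkeys]; exact PySem.Set.nodup_ofList _) 0, hkeys]
    apply List.map_congr_left
    intro k hk
    have hk' : k ∈ pvSl words := (PySem.Set.mem_ofList _ _).mp hk
    have : (List.foldl pvDpStep PySem.Dict.empty (pvSl words)).getD k 0 =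
        ((List.foldl pvDpStep PySem.Dict.empty (pvSl words)).get? k).getD 0 := rfl
    rw [this, hspec k]
    simp [hk']
  show (PySem.List.max? (words.map fun s =>
      pvDfsA (PySem.Set.ofList (words.map String.toList)) s.toList.length s.toList) (fun x => x)).getD 0 =
    (PySem.List.max? (List.foldl pvDpStep PySem.Dict.empty (pvSl words)).values (fun x => x)).getD 0
  rw [hvals]
  have hmaps : words.map (fun s =>
      pvDfsA (PySem.Set.ofList (words.map String.toList)) s.toList.length s.toList) =
      (pvAllL words).map (pvF words) := by
    unfold pvAllL pvF pvWs pvAllL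
    rw [List.map_map]
    rfl
  rw [hmaps]
  congr 1
  apply pv_max?_congr_mem
  intro x
  simp only [List.mem_map]
  constructor
  · rintro ⟨w, hw, rfl⟩
    exact ⟨w, (PySem.Set.mem_ofList _ _).mpr ((pvSl_mem words w).mpr hw), rfl⟩
  · rintro ⟨w, hw, rfl⟩
    exact ⟨w, (pvSl_mem words w).mp ((PySem.Set.mem_ofList _ _).mp hw), rfl⟩
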